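-- pv_equiv track=rewrite | github.com/tomhosker/lucifer_in_starlight | main.py | make_flags
-- ===== SOURCE A (Python) =====
-- RECOGNISED_ARGUMENTS = (
--     "--force-placeholders-all", "--force-placeholders-poems",
--     "--force-placeholders-prayers", "--force-placeholders-prose",
--     "--force-placeholders-images")
--
-- def make_flags(cl_arguments):
--     """ Interpret the command line arguments. """
--     result = dict()
--     for recognised_argument in RECOGNISED_ARGUMENTS:
--         if recognised_argument in cl_arguments:
--             result[recognised_argument] = True
--         else:
--             result[recognised_argument] = False
--     return result
-- ===== SOURCE B (Python) =====
-- RECOGNISED_ARGUMENTS = (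
--     "--force-placeholders-all", "--force-placeholders-poems",
--     "--force-placeholders-prayers", "--force-placeholders-prose",
--     "--force-placeholders-images")
--
-- def make_flags(cl_arguments):
--     """ Interpret the command line arguments. """
--     result = {argument: False for argument in RECOGNISED_ARGUMENTS}
--     for item in cl_arguments:
--         if item in RECOGNISED_ARGUMENTS:
--             result[item] = True
--     return result
-- ===== Notes on version B (the rewrite author's own statement) =====
-- stated objective: idiomatic
-- what changed: B initialises all five recognised flags to False with a dict comprehension and then drives a single loop over the input arguments, setting a flag to True when a recognised one appears, instead of A's loop over the recognised keys with a membership scan of the input per key.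
import Mathlib
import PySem

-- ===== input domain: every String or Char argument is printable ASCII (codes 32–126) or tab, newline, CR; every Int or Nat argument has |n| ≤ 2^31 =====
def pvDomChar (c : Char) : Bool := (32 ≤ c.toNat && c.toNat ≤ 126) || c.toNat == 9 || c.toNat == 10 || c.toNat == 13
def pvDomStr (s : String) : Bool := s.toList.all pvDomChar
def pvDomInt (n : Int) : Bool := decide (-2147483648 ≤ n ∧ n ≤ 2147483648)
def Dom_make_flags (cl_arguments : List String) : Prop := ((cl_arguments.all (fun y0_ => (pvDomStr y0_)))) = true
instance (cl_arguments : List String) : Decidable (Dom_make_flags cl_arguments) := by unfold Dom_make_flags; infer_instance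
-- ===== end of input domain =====

-- B initialises all recognised flags to False and drives one loop over the input (idiomatic inversion of A's traversal); A and B are proved equal on all inputs.


def RECOGNISED_ARGUMENTS : List String :=
  ["--force-placeholders-all", "--force-placeholders-poems",
   "--force-placeholders-prayers", "--force-placeholders-prose",
   "--force-placeholders-images"]

-- ===== PORT A =====
-- A: loop over the recognised keys, membership-test each against cl_arguments
def make_flags (cl_arguments : List String) : List (String × Bool) :=
  (RECOGNISED_ARGUMENTS.foldl
    (fun result recognised_argument =>
      if recognised_argument ∈ cl_arguments then
        result.insert recognised_argument true
      else
        result.insert recognised_argument false)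
    (PySem.Dict.empty : PySem.Dict String Bool)).items

-- ===== PORT B =====
-- B: initialise every recognised flag to False, then one loop over cl_arguments
def make_flags_alt (cl_arguments : List String) : List (String × Bool) :=
  (cl_arguments.foldl
    (fun result item =>
      if item ∈ RECOGNISED_ARGUMENTS then result.insert item true else result)
    (PySem.Dict.mk (RECOGNISED_ARGUMENTS.map (fun argument => (argument, false))))).items

-- ===== PRECONDITION & SPEC =====
def Spec_make_flags (cl_arguments : List String) (out : List (String × Bool)) : Prop := out = make_flags_alt cl_arguments
instance (cl_arguments : List String) (out : List (String × Bool)) : Decidable (Spec_make_flags cl_arguments out) := by unfold Spec_make_flags; infer_instance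

-- ===== CLAIM (what is proved, stated in full; the proofs are below) =====
def Claim_equal_make_flags : Prop := ∀ (cl_arguments : List String), Dom_make_flags cl_arguments → Spec_make_flags cl_arguments (make_flags cl_arguments)

-- ===== LEMMAS AND PROOFS =====

-- A's loop writes fresh distinct keys, so its items are just the recognised keys with their membership bits.
theorem make_flags_eq_map (cl : List String) :
    make_flags cl = RECOGNISED_ARGUMENTS.map (fun k => (k, decide (k ∈ cl))) := by
  have hstep :
      (fun (result : PySem.Dict String Bool) recognised_argument =>
        if recognised_argument ∈ cl then
          result.insert recognised_argument true
        else
          result.insert recognised_argument false)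
      = fun result recognised_argument =>
          result.insert recognised_argument (decide (recognised_argument ∈ cl)) := by
    funext result r
    by_cases h : r ∈ cl <;> simp [h]
  unfold make_flags
  rw [hstep]
  rw [PySem.Dict.items_foldl_insert_fresh (k := fun a => a) (v := fun a => decide (a ∈ cl))
      (d := PySem.Dict.empty) (l := RECOGNISED_ARGUMENTS)
      (by intro a _; simp) (by decide)]
  simp [PySem.Dict.empty]

-- B's loop: starting from any assignment b over the recognised keys, folding the
-- input sets exactly the recognised members to true.
theorem alt_fold_items (xs : List String) (b : String → Bool) :
    (xs.foldl
      (fun result item =>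
        if item ∈ RECOGNISED_ARGUMENTS then result.insert item true else result)
      (PySem.Dict.mk (RECOGNISED_ARGUMENTS.map (fun k => (k, b k))))).items
    = RECOGNISED_ARGUMENTS.map (fun k => (k, b k || decide (k ∈ xs))) := by
  induction xs generalizing b with
  | nil => simp
  | cons x xs ih =>
    simp only [List.foldl_cons]
    by_cases hx : x ∈ RECOGNISED_ARGUMENTS
    · rw [if_pos hx]
      have hcont : (PySem.Dict.mk (RECOGNISED_ARGUMENTS.map (fun k => (k, b k)))).contains x = true := by
        rw [PySem.Dict.contains_mk]
        simp only [List.any_map, List.any_eq_true, Function.comp]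
        exact ⟨x, hx, by simp⟩
      have hins :
          (PySem.Dict.mk (RECOGNISED_ARGUMENTS.map (fun k => (k, b k)))).insert x true
          = PySem.Dict.mk (RECOGNISED_ARGUMENTS.map (fun k => (k, if k = x then true else b k))) := by
        apply PySem.Dict.ext
        rw [PySem.Dict.items_insert_of_contains _ _ hcont]
        simp only [PySem.Dict.items, List.map_map]
        apply List.map_congr_left
        intro k _
        by_cases hk : k = x
        · subst hk; simp
        · simp [hk, Ne.symm hk, show (k == x) = false from by simp [hk]]
      rw [hins, ih]
      apply List.map_congr_left
      intro k _
      by_cases hk : k = x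
      · subst hk; simp
      · simp [hk]
    · rw [if_neg hx, ih]
      apply List.map_congr_left
      intro k hk
      have : ¬ k = x := by rintro rfl; exact hx hk
      simp [this]

theorem make_flags_alt_eq_map (cl : List String) :
    make_flags_alt cl = RECOGNISED_ARGUMENTS.map (fun k => (k, decide (k ∈ cl))) := by
  unfold make_flags_alt
  rw [alt_fold_items cl (fun _ => false)]
  simp

-- ===== VERDICT (by name: the statement is the Claim_ definition above) =====
theorem make_flags_spec : Claim_equal_make_flags := by
  intro cl _
  unfold Spec_make_flags
  rw [make_flags_eq_map, make_flags_alt_eq_map]
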